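-- pv_equiv track=rewrite | github.com/KYUJEONGLEE/SW-AI-W02-05 | week2/problem-solving/백트래킹_추가문제2.py | no_dup_suyeal
-- ===== SOURCE A (Python) =====
-- def no_dup_suyeal(n, m):
--     result = []
--     visited = [False] * n
--
--     def backtracking(start, current_suyeal):
--
--         if len(current_suyeal) == m:
--             result_suyeal = current_suyeal.copy()
--             result.append(result_suyeal)
--             return
--
--         for i in range(start, n):
--             if not visited[i]:
--                 visited[i] = True
--                 current_suyeal.append(i + 1)
--                 backtracking(i, current_suyeal)
--                 visited[i] = False
--                 current_suyeal.pop()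
--
--     backtracking(0, [])
--     return result
-- ===== SOURCE B (Python) =====
-- def no_dup_suyeal(n, m):
--     # include/exclude binary recursion over element indices instead of
--     # backtracking with a visited array; same lexicographic order.
--     def go(i, k):
--         if k == 0:
--             return [[]]
--         if i >= n:
--             return []
--         taken = [[i + 1] + rest for rest in go(i + 1, k - 1)]
--         return taken + go(i + 1, k)
--     return go(0, m)
-- ===== Notes on version B (the rewrite author's own statement) =====
-- stated objective: alternative
-- what changed: Replaced the backtracking search that mutates a shared visited array and current-path list with a pure binary include/exclude recursion over element indices that returns the combination lists directly.
import Mathlib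
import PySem

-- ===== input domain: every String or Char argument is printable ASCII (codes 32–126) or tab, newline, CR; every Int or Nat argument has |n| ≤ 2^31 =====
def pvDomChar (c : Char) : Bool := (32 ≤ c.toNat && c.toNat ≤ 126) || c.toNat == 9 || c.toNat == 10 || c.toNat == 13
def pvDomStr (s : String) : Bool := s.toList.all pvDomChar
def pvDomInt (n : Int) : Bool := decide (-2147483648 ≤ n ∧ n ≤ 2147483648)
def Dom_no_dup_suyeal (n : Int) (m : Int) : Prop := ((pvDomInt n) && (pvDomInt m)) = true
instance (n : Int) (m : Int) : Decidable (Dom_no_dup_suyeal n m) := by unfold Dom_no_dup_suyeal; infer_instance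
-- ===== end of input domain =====

-- B replaces A's visited-array backtracking by a pure include/exclude recursion over element
-- indices (same lexicographic output, similar cost; objective: alternative decomposition).


-- ===== PORT A =====
-- visited[i] (always accessed with 0 ≤ i < len(visited) here; exact on that range)
def vgetA (v : List Bool) (i : Int) : Bool := (PySem.List.pyGet? v i).getD false

-- The closure `backtracking(start, current_suyeal)`: `visited` and `current_suyeal` are
-- restored to their entry values by the time each call returns (set/append are undone by
-- reset/pop), so they are threaded as read-only values and only `result` is threaded
-- through; fuel only makes the same recursion structurally total (it is proved sufficient).
def btA (m n : Int) : Nat → List Bool → Int → List Int → List (List Int) → List (List Int)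
  | 0, _, _, _, res => res
  | f+1, v, start, cur, res =>
    if (cur.length : Int) = m then
      res ++ [cur]                         -- result.append(current_suyeal.copy())
    else
      (PySem.List.pyRange start n 1).foldl (fun r i =>
        if vgetA v i = false then          -- if not visited[i]
          btA m n f (PySem.List.pySetD v i true) i (cur ++ [i + 1]) r
        else r) res

def no_dup_suyeal (n : Int) (m : Int) : List (List Int) :=
  btA m n (n.toNat + 1) (List.replicate n.toNat false) 0 [] []

-- ===== PORT B =====
def goB (n : Int) (i : Int) (k : Int) : List (List Int) :=
  if k = 0 then [[]]
  else if n ≤ i then []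
  else ((goB n (i + 1) (k - 1)).map (fun rest => (i + 1) :: rest)) ++ goB n (i + 1) k
termination_by (n - i).toNat
decreasing_by all_goals simp_all

def no_dup_suyeal_alt (n : Int) (m : Int) : List (List Int) := goB n 0 m

-- ===== PRECONDITION & SPEC =====
def Spec_no_dup_suyeal (n : Int) (m : Int) (out : List (List Int)) : Prop := out = no_dup_suyeal_alt n m
instance (n : Int) (m : Int) (out : List (List Int)) : Decidable (Spec_no_dup_suyeal n m out) := by unfold Spec_no_dup_suyeal; infer_instance

-- ===== CLAIM (what is proved, stated in full; the proofs are below) =====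
def Claim_equal_no_dup_suyeal : Prop := ∀ (n : Int) (m : Int), Dom_no_dup_suyeal n m → Spec_no_dup_suyeal n m (no_dup_suyeal n m)

-- ===== LEMMAS AND PROOFS =====

lemma goB_nil {n i k : Int} (hk : k ≠ 0) (hi : n ≤ i) : goB n i k = [] := by
  rw [goB]; simp [hk, hi]

lemma vget_replicate (c : Nat) (j : Int) : vgetA (List.replicate c false) j = false := by
  unfold vgetA
  cases h : PySem.List.pyGet? (List.replicate c false) j with
  | none => rfl
  | some b =>
    have := PySem.List.mem_of_pyGet?_eq_some _ h
    simp at this; simp [this]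

lemma vget_set_self {v : List Bool} {i : Int} (h0 : 0 ≤ i) (hl : i.toNat < v.length) :
    vgetA (PySem.List.pySetD v i true) i = true := by
  unfold vgetA
  rw [PySem.List.pySetD_of_nonneg v true h0, PySem.List.pyGet?_of_nonneg _ h0]
  simp [hl]

lemma vget_set_ne {v : List Bool} {i j : Int} (h0 : 0 ≤ i) (h0j : 0 ≤ j) (hne : j ≠ i) :
    vgetA (PySem.List.pySetD v i true) j = vgetA v j := by
  unfold vgetA
  rw [PySem.List.pySetD_of_nonneg v true h0, PySem.List.pyGet?_of_nonneg _ h0j,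
      PySem.List.pyGet?_of_nonneg _ h0j]
  have : i.toNat ≠ j.toNat := by omega
  simp [this]

-- the effective start of the loop: `start` itself, or `start+1` when visited[start] holds
def effA (v : List Bool) (i : Int) : Int := if vgetA v i then i + 1 else i

lemma eff_ge {v : List Bool} {i : Int} : i ≤ effA v i := by
  unfold effA; split <;> omega

-- the loop body of btA, from index i to n, with v/cur fixed (as they are in A, which
-- restores them after each iteration)
lemma loopA (m n : Int) (f : Nat) {k : Int} (hk : k ≠ 0) (cur : List Int)
    (hkc : k = m - cur.length)
    (IH : ∀ (v : List Bool) (start : Int) (cur : List Int) (res : List (List Int)),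
      0 ≤ start → v.length = n.toNat →
      (∀ j : Int, start < j → j < n → vgetA v j = false) →
      (n - effA v start).toNat < f →
      btA m n f v start cur res = res ++ (goB n (effA v start) (m - cur.length)).map (cur ++ ·)) :
    ∀ (c : Nat) (i : Int) (v : List Bool) (res : List (List Int)),
      (n - i).toNat ≤ c → 0 ≤ i → v.length = n.toNat →
      (∀ j : Int, i < j → j < n → vgetA v j = false) →
      (n - effA v i).toNat ≤ f →
      (PySem.List.pyRange i n 1).foldl (fun r x =>
          if vgetA v x = false then
            btA m n f (PySem.List.pySetD v x true) x (cur ++ [x + 1]) r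
          else r) res
        = res ++ (goB n (effA v i) k).map (cur ++ ·) := by
  intro c
  induction c with
  | zero =>
    intro i v res hc h0 hl hinv hf
    have hni : n ≤ i := by omega
    rw [PySem.List.pyRange_one_eq_nil hni, goB_nil hk (le_trans hni eff_ge)]
    simp
  | succ c ih =>
    intro i v res hc h0 hl hinv hf
    by_cases hni : n ≤ i
    · rw [PySem.List.pyRange_one_eq_nil hni, goB_nil hk (le_trans hni eff_ge)]
      simp
    · rw [not_le] at hni
      rw [PySem.List.pyRange_one_cons hni, List.foldl_cons]
      -- tail invariant
      have hinv' : ∀ j : Int, i + 1 < j → j < n → vgetA v j = false := by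
        intro j hj hjn; exact hinv j (by omega) hjn
      have heff1 : effA v (i+1) = i + 1 ∨ n ≤ i + 1 := by
        unfold effA
        by_cases hv1 : vgetA v (i+1)
        · by_cases hn1 : i + 1 < n
          · exact absurd (hinv (i+1) (by omega) hn1) (by simp [hv1])
          · right; omega
        · left; simp [hv1]
      by_cases hv : vgetA v i = false
      · -- not visited[i]: recurse
        have heff : effA v i = i := by unfold effA; simp [hv]
        rw [heff] at hf
        have hself : vgetA (PySem.List.pySetD v i true) i = true :=
          vget_set_self h0 (by omega)
        have heffs : effA (PySem.List.pySetD v i true) i = i + 1 := by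
          unfold effA; simp [hself]
        have hstep := IH (PySem.List.pySetD v i true) i (cur ++ [i + 1]) res h0
          (by rw [PySem.List.pySetD_of_nonneg v true h0]; simpa using hl)
          (by intro j hj hjn
              rw [vget_set_ne h0 (by omega) (by omega)]
              exact hinv j hj hjn)
          (by rw [heffs]; omega)
        rw [heffs] at hstep
        simp only [hv, if_true]
        rw [hstep]
        have htail := ih (i+1) v
          (res ++ (goB n (i + 1) (m - (cur ++ [i+1]).length)).map ((cur ++ [i+1]) ++ ·))
          (by omega) (by omega) hl hinv'
          (by rcases heff1 with h | h
              · rw [h]; omega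
              · have h2 := eff_ge (v := v) (i := i+1); omega)
        rw [htail]
        have hgt : goB n (effA v (i+1)) k = goB n (i+1) k := by
          rcases heff1 with h | h
          · rw [h]
          · rw [goB_nil hk (le_trans h eff_ge), goB_nil hk h]
        rw [hgt, heff]
        -- fold RHS: unfold goB at i
        have hkc' : m - ((cur ++ [i+1]).length : Int) = k - 1 := by
          simp [hkc]; omega
        rw [hkc']
        conv_rhs => rw [goB]
        rw [if_neg hk, if_neg (by omega : ¬ n ≤ i)]
        simp [List.map_map, Function.comp, List.append_assoc]
      · -- visited[i]: skip
        have hvt : vgetA v i = true := by revert hv; cases vgetA v i <;> simp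
        have heff : effA v i = i + 1 := by unfold effA; simp [hvt]
        rw [heff] at hf
        rw [if_neg (by simp [hvt])]
        have htail := ih (i+1) v res (by omega) (by omega) hl hinv'
          (by rcases heff1 with h | h
              · rw [h]; omega
              · have h2 := eff_ge (v := v) (i := i+1); omega)
        rw [htail, heff]
        rcases heff1 with h | h
        · rw [h]
        · rw [goB_nil hk (le_trans h eff_ge), goB_nil hk h]

lemma btA_main (m n : Int) : ∀ (f : Nat) (v : List Bool) (start : Int) (cur : List Int)
    (res : List (List Int)),
    0 ≤ start → v.length = n.toNat →
    (∀ j : Int, start < j → j < n → vgetA v j = false) →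
    (n - effA v start).toNat < f →
    btA m n f v start cur res = res ++ (goB n (effA v start) (m - cur.length)).map (cur ++ ·) := by
  intro f
  induction f with
  | zero => intro _ _ _ _ _ _ _ hf; omega
  | succ f ih =>
    intro v start cur res h0 hl hinv hf
    show btA m n (f+1) v start cur res = _
    rw [btA]
    by_cases hm : (cur.length : Int) = m
    · rw [if_pos hm]
      have : m - (cur.length : Int) = 0 := by omega
      rw [this, goB]; simp
    · rw [if_neg hm]
      exact loopA m n f (k := m - cur.length) (by omega) cur rfl ih
        (n - start).toNat start v res (le_refl _) h0 hl hinv (by omega)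

-- ===== VERDICT (by name: the statement is the Claim_ definition above) =====
theorem no_dup_suyeal_spec : Claim_equal_no_dup_suyeal := by
  intro n m _
  unfold Spec_no_dup_suyeal no_dup_suyeal no_dup_suyeal_alt
  have heff : effA (List.replicate n.toNat false) 0 = 0 := by
    unfold effA; rw [vget_replicate]; simp
  rw [btA_main m n (n.toNat + 1) (List.replicate n.toNat false) 0 [] []
      (le_refl 0) (by simp)
      (fun j _ _ => vget_replicate n.toNat j)
      (by rw [heff]; omega)]
  rw [heff]
  simp
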